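-- pv_equiv track=rewrite | github.com/hji1014/HJI_Algorithm | Programmers/Lv_1/Lv_1_solution.py | solution
-- ===== SOURCE A (Python) =====
-- def solution(n):
--     answer = 0
--     m = list(map(int, str(n)))
--     m.sort()
--     multi = 1
--
--     for i in m:
--         answer += i * multi
--         multi *= 10
--
--     return answer
-- ===== SOURCE B (Python) =====
-- def solution(n):
--     counts = [0] * 10
--     for c in str(n):
--         counts[int(c)] += 1
--     result = 0
--     for d in range(9, -1, -1):
--         for _ in range(counts[d]):
--             result = result * 10 + d
--     return result
-- ===== Notes on version B (the rewrite author's own statement) =====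
-- stated objective: alternative
-- what changed: B replaces A's comparison sort plus weighted (power-of-10 multiplier) accumulation by a counting sort: it tallies the ten digit values in a fixed bucket array and emits the result digit-by-digit from the highest bucket down to the lowest, so no sort call and no multiplier accumulator exist at all.
import Mathlib
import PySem

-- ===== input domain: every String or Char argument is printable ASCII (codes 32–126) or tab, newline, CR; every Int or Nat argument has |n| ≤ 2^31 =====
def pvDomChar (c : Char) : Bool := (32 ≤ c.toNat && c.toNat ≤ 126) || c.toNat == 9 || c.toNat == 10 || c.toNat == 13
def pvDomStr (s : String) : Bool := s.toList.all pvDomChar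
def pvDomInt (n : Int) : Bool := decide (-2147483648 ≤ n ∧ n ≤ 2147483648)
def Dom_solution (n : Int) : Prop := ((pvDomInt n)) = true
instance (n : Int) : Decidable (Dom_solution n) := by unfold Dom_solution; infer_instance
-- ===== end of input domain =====

-- B replaces A's comparison sort + power-of-10 multiplier accumulation by a counting sort over
-- ten fixed digit buckets, emitting the result from the highest bucket down to the lowest (objective: alternative).


-- ===== PORT A =====
-- int(c) on one character of str(n): PySem.Int.ofChars? [c]; none = ValueError,
-- which only happens for the '-' of a negative n — excluded by Pre_solution.
def solution (n : Int) : Int :=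
  let m : List Int := (PySem.Int.toChars n).map (fun c => (PySem.Int.ofChars? [c]).getD 0)
  let ms := PySem.List.sorted m (fun x => x) false
  (ms.foldl (fun (p : Int × Int) i => (p.1 + i * p.2, p.2 * 10)) (0, 1)).1

-- ===== PORT B =====
def solution_alt (n : Int) : Int :=
  let counts : List Int :=
    (PySem.Int.toChars n).foldl
      (fun cs c =>
        let d := (PySem.Int.ofChars? [c]).getD 0
        PySem.List.pySetD cs d (PySem.List.pyGetD cs d 0 + 1))
      (List.replicate 10 0)
  (PySem.List.pyRange 9 (-1) (-1)).foldl
    (fun r d =>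
      (PySem.List.pyRange 0 (PySem.List.pyGetD counts d 0) 1).foldl (fun r _ => r * 10 + d) r)
    0

-- ===== PRECONDITION & SPEC =====
-- Pre_ excludes negative n: there str(n) starts with a minus sign, int of that sign raises ValueError in A, and B's counts['-'-index] raises too.
def Pre_solution (n : Int) : Prop := 0 ≤ n
instance (n : Int) : Decidable (Pre_solution n) := by unfold Pre_solution; infer_instance
def pvWitness_solution : Int := 118
def Spec_solution (n : Int) (out : Int) : Prop := out = solution_alt n
instance (n : Int) (out : Int) : Decidable (Spec_solution n out) := by unfold Spec_solution; infer_instance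

-- ===== CLAIM (what is proved, stated in full; the proofs are below) =====
def Claim_equal_solution : Prop := ∀ (n : Int), Dom_solution n → Pre_solution n → Spec_solution n (solution n)

-- ===== LEMMAS AND PROOFS =====

-- the digit values of str(n), as both Pythons extract them
def pvDigits (n : Int) : List Int :=
  (PySem.Int.toChars n).map (fun c => (PySem.Int.ofChars? [c]).getD 0)

-- B's emitted digit sequence: highest bucket first, each digit repeated its multiplicity
def pvBuckets (l : List Int) : List Int :=
  ([9,8,7,6,5,4,3,2,1,0] : List Int).flatMap (fun d => List.replicate (l.count d) d)

theorem mem_toDigitsCore_digits (fuel m : Nat) (acc : List Char)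
    (hacc : ∀ c ∈ acc, c ∈ (['0','1','2','3','4','5','6','7','8','9'] : List Char)) :
    ∀ c ∈ Nat.toDigitsCore 10 fuel m acc, c ∈ (['0','1','2','3','4','5','6','7','8','9'] : List Char) := by
  induction fuel generalizing m acc with
  | zero => simpa [Nat.toDigitsCore] using hacc
  | succ f ih =>
    have hd : (m % 10).digitChar ∈ (['0','1','2','3','4','5','6','7','8','9'] : List Char) := by
      have : m % 10 < 10 := Nat.mod_lt _ (by omega)
      interval_cases h : m % 10 <;> decide
    have hacc' : ∀ c ∈ (m % 10).digitChar :: acc, c ∈ (['0','1','2','3','4','5','6','7','8','9'] : List Char) := by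
      intro c hc
      rcases List.mem_cons.1 hc with h | h
      · exact h ▸ hd
      · exact hacc c h
    intro c hc
    rw [Nat.toDigitsCore] at hc
    split at hc
    · exact hacc' c hc
    · exact ih _ _ hacc' c hc

theorem digits_range (n : Int) (hn : 0 ≤ n) : ∀ d ∈ pvDigits n, 0 ≤ d ∧ d < 10 := by
  intro d hd
  simp only [pvDigits, List.mem_map] at hd
  obtain ⟨c, hc, rfl⟩ := hd
  have hc' : c ∈ (['0','1','2','3','4','5','6','7','8','9'] : List Char) := by
    have ht : PySem.Int.toChars n = Nat.toDigits 10 n.toNat := by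
      simp [PySem.Int.toChars, not_lt.2 hn]
    rw [ht] at hc
    exact mem_toDigitsCore_digits _ _ [] (by simp) c hc
  fin_cases hc' <;> decide

-- B's bucket-update step, on the extracted digit value
def pvStep (cs : List Int) (d : Int) : List Int :=
  PySem.List.pySetD cs d (PySem.List.pyGetD cs d 0 + 1)

theorem counts_getD (l : List Int) (h : ∀ x ∈ l, 0 ≤ x ∧ x < 10) :
    ∀ (cs : List Int), cs.length = 10 → ∀ (j : Int), 0 ≤ j → j < 10 →
      PySem.List.pyGetD (l.foldl pvStep cs) j 0 = PySem.List.pyGetD cs j 0 + (l.count j : Int) := by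
  induction l with
  | nil => intro cs _ j _ _; simp
  | cons d t ih =>
    intro cs hlen j hj0 hj10
    obtain ⟨hd0, hd10⟩ := h d (List.mem_cons_self)
    have hdn : ((d.toNat : Nat) : Int) = d := Int.toNat_of_nonneg hd0
    have hlt : d.toNat < cs.length := by omega
    have hlen' : (pvStep cs d).length = 10 := by
      simp [pvStep, PySem.List.length_pySetD, hlen]
    have hjn : ((j.toNat : Nat) : Int) = j := Int.toNat_of_nonneg hj0
    rw [List.foldl_cons, ih (fun x hx => h x (List.mem_cons_of_mem _ hx)) _ hlen' j hj0 hj10]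
    have hstep := PySem.List.pyGetD_pySetD_natCast cs d.toNat j.toNat
      (PySem.List.pyGetD cs ((d.toNat : Nat) : Int) 0 + 1) 0 hlt
    rw [pvStep]
    conv_lhs => rw [← hdn, ← hjn]
    rw [hstep]
    by_cases hjd : j = d
    · subst hjd
      rw [if_pos (by omega)]
      simp [hdn]
      ring
    · rw [if_neg (by omega), hjn]
      have hne : (d == j) = false := by simp; omega
      simp [List.count_cons, hne]

theorem buckets_perm (l : List Int) (h : ∀ x ∈ l, 0 ≤ x ∧ x < 10) :
    (pvBuckets l).Perm l := by
  rw [List.perm_iff_count]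
  intro x
  simp only [pvBuckets, List.flatMap_cons, List.flatMap_nil, List.append_nil,
    List.count_append, List.count_replicate]
  by_cases hx : 0 ≤ x ∧ x < 10
  · obtain ⟨h0, h1⟩ := hx
    interval_cases x <;> simp
  · have h0 : l.count x = 0 := List.count_eq_zero.2 (fun hm => hx (h x hm))
    simp [h0]
    refine ⟨?_, ?_, ?_, ?_, ?_, ?_, ?_, ?_, ?_, ?_⟩ <;> (intro h'; subst h'; exact h0)

theorem pairwise_ge_flatMap_replicate (l : List Int) (ds : List Int)
    (hds : ds.Pairwise (fun a b : Int => b < a)) :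
    (ds.flatMap (fun d => List.replicate (l.count d) d)).Pairwise (fun a b : Int => b ≤ a) := by
  induction ds with
  | nil => simp
  | cons d t ih =>
    rw [List.flatMap_cons, List.pairwise_append]
    rcases List.pairwise_cons.1 hds with ⟨hhead, htail⟩
    refine ⟨List.pairwise_replicate.2 (Or.inr le_rfl), ih htail, ?_⟩
    intro a ha b hb
    obtain ⟨d', hd', hb'⟩ := List.mem_flatMap.1 hb
    rw [List.eq_of_mem_replicate ha, List.eq_of_mem_replicate hb']
    exact le_of_lt (hhead d' hd')

theorem buckets_pairwise (l : List Int) :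
    (pvBuckets l).Pairwise (fun a b : Int => b ≤ a) :=
  pairwise_ge_flatMap_replicate l _ (by decide)

-- the inner 'for _ in range(c)' loop is a fold over replicate
theorem foldl_const_replicate (d : Int) (l : List Int) (r : Int) :
    l.foldl (fun r _ => r * 10 + d) r
      = (List.replicate l.length d).foldl (fun r d => r * 10 + d) r := by
  induction l generalizing r with
  | nil => rfl
  | cons x t ih => simp [List.replicate_succ, ih]

-- sorted descending is the reverse of sorted ascending (identity key on Int)
theorem sorted_rev_eq_reverse_sorted (l : List Int) :
    PySem.List.sorted l (fun x => x) true = (PySem.List.sorted l (fun x => x) false).reverse := by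
  have hp : (PySem.List.sorted l (fun x => x) true).Perm
      ((PySem.List.sorted l (fun x => x) false).reverse) :=
    (PySem.List.sorted_perm l (fun x => x) true).trans
      ((PySem.List.sorted_perm l (fun x => x) false).symm.trans
        (List.reverse_perm _).symm)
  exact List.Perm.eq_of_pairwise (le := fun a b : Int => b ≤ a)
    (fun a b _ _ h1 h2 => le_antisymm h2 h1)
    (PySem.List.sorted_pairwise_rev l (fun x => x))
    ((List.pairwise_reverse).2 (PySem.List.sorted_pairwise l (fun x => x)))
    hp

-- the buckets list IS sorted(digits, reverse=True)
theorem buckets_eq_sorted_rev (l : List Int) (h : ∀ x ∈ l, 0 ≤ x ∧ x < 10) :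
    pvBuckets l = PySem.List.sorted l (fun x => x) true := by
  have hp : (pvBuckets l).Perm (PySem.List.sorted l (fun x => x) true) :=
    (buckets_perm l h).trans (PySem.List.sorted_perm l (fun x => x) true).symm
  exact List.Perm.eq_of_pairwise (le := fun a b : Int => b ≤ a)
    (fun a b _ _ h1 h2 => le_antisymm h2 h1)
    (buckets_pairwise l)
    (PySem.List.sorted_pairwise_rev l (fun x => x))
    hp

-- A's loop state (answer, multi) over a list equals answer + multi * (little-endian value)
theorem weighted_fold_eq (l : List Int) (a m : Int) :
    (l.foldl (fun (p : Int × Int) i => (p.1 + i * p.2, p.2 * 10)) (a, m)).1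
      = a + m * l.foldr (fun d acc => 10 * acc + d) 0 := by
  induction l generalizing a m with
  | nil => simp
  | cons d t ih => simp [List.foldl_cons, ih]; ring

-- B computes the Horner fold of the buckets list
theorem solution_alt_eq (n : Int) (h : ∀ x ∈ pvDigits n, 0 ≤ x ∧ x < 10) :
    solution_alt n = (pvBuckets (pvDigits n)).foldl (fun r d => r * 10 + d) 0 := by
  unfold solution_alt
  rw [show ((PySem.Int.toChars n).foldl
      (fun cs c =>
        let d := (PySem.Int.ofChars? [c]).getD 0
        PySem.List.pySetD cs d (PySem.List.pyGetD cs d 0 + 1))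
      (List.replicate 10 0)) = (pvDigits n).foldl pvStep (List.replicate 10 0) by
    rw [pvDigits, List.foldl_map]; rfl]
  have hc : ∀ (j : Int), 0 ≤ j → j < 10 →
      PySem.List.pyGetD ((pvDigits n).foldl pvStep (List.replicate 10 0)) j 0
        = ((pvDigits n).count j : Int) := by
    intro j hj0 hj10
    rw [counts_getD _ h _ (by simp) j hj0 hj10]
    have : PySem.List.pyGetD (List.replicate 10 (0:Int)) j 0 = 0 := by
      rw [PySem.List.pyGetD_eq_getElem _ _ hj0 (by simp; omega)]
      interval_cases j <;> rfl
    rw [this]; ring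
  rw [show PySem.List.pyRange 9 (-1) (-1) = ([9,8,7,6,5,4,3,2,1,0] : List Int) from by decide]
  simp only [List.foldl_cons, List.foldl_nil]
  rw [hc 9 (by norm_num) (by norm_num), hc 8 (by norm_num) (by norm_num),
    hc 7 (by norm_num) (by norm_num), hc 6 (by norm_num) (by norm_num),
    hc 5 (by norm_num) (by norm_num), hc 4 (by norm_num) (by norm_num),
    hc 3 (by norm_num) (by norm_num), hc 2 (by norm_num) (by norm_num),
    hc 1 (by norm_num) (by norm_num), hc 0 (by norm_num) (by norm_num)]
  simp only [foldl_const_replicate, PySem.List.length_pyRange_one]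
  simp [pvBuckets, List.foldl_append]

-- the two Horner step functions agree up to commutativity of *
theorem foldr_horner_comm (l : List Int) (r : Int) :
    l.foldr (fun x y => y * 10 + x) r = l.foldr (fun d acc => 10 * acc + d) r := by
  induction l with
  | nil => rfl
  | cons x t ih => simp [ih]; ring

theorem solution_spec : Claim_equal_solution := by
  intro n _ hn
  have h := digits_range n hn
  unfold Spec_solution
  rw [solution_alt_eq n h, buckets_eq_sorted_rev _ h, sorted_rev_eq_reverse_sorted,
    List.foldl_reverse, foldr_horner_comm]
  show solution n = _
  unfold solution
  rw [weighted_fold_eq]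
  simp only [pvDigits]
  ring
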